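-- pv_equiv track=rewrite | github.com/mikudehuane/File-Name-Cleaner | rename.py | split_fn_by_number
-- ===== SOURCE A (Python) =====
-- def split_fn_by_number(fn):
--     """split file name by numbers
--
--     '[KTXP][Vivy-Fluorite_Eye's_Song-][03][GB_CN][1080p][HEVC_opus]'
--     ->
--     [
--         '[KTXP][Vivy-Fluorite_Eye's_Song-][',
--         '03',
--         '][GB_CN][',
--         '1080',
--         'p][HEVC_opus]'
--     ]
--     """
--     builder = []  # temporate string builder
--     ret = []  # hold the built strings
--
--     def _build_string():  # build string from builder and fill into ret
--         if builder:  # at the beginning, builder is empty, or at endding, may be empty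
--             ret.append(''.join(builder))
--             builder.clear()
--
--     reading_digit = False  # is last char a digit
--     for char in fn:
--         is_digit = char.isdigit()
--
--         if is_digit != reading_digit:  # switch state, build string from builder
--             _build_string()
--
--         builder.append(char)
--
--         reading_digit = is_digit
--
--     _build_string()
--
--     return ret
-- ===== SOURCE B (Python) =====
-- def split_fn_by_number(fn):
--     # staged: first compute the boundary indices where the digit/non-digit
--     # class changes, then slice the string between consecutive boundaries
--     cuts = [i for i in range(len(fn)) if i == 0 or fn[i].isdigit() != fn[i - 1].isdigit()]
--     cuts.append(len(fn))
--     return [fn[a:b] for a, b in zip(cuts, cuts[1:])]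
-- ===== Notes on version B (the rewrite author's own statement) =====
-- stated objective: alternative
-- what changed: Replaced A's single-pass state machine (reading_digit flag with a builder/flush helper) by a staged index-based algorithm: first compute the list of boundary indices where the digit class changes, then materialise the segments by slicing between consecutive boundaries.
import Mathlib
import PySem

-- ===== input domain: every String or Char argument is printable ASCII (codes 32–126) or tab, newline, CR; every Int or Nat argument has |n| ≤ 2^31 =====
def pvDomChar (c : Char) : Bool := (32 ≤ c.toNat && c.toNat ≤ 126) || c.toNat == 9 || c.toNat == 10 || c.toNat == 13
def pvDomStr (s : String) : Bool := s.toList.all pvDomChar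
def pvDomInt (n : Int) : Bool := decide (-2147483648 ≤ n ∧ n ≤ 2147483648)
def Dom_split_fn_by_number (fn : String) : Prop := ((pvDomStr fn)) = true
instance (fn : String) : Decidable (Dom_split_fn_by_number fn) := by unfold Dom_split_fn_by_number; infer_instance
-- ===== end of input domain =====

-- B replaces A's single-pass reading_digit state machine (builder/flush helper) by a
-- staged algorithm: first compute the boundary indices where the digit class changes,
-- then slice between consecutive boundaries; objective: alternative decomposition.

-- ===== PORT A =====
-- _build_string: flush the builder into ret when nonempty
def pvBuildA (builder : List Char) (ret : List String) : List Char × List String :=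
  if builder ≠ [] then ([], ret ++ [String.mk builder]) else (builder, ret)

-- one iteration of A's for-loop; state = (builder, ret, reading_digit)
def pvStepA (st : List Char × List String × Bool) (c : Char) : List Char × List String × Bool :=
  let isDigit := PySem.Chars.isdigit c
  let (builder, ret) := if isDigit != st.2.2 then pvBuildA st.1 st.2.1 else (st.1, st.2.1)
  (builder ++ [c], ret, isDigit)

def split_fn_by_number (fn : String) : List String :=
  let st := fn.toList.foldl pvStepA ([], [], false)
  (pvBuildA st.1 st.2.1).2

-- ===== PORT B =====
-- boundary predicate: i == 0 or fn[i].isdigit() != fn[i-1].isdigit();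
-- indices drawn from range(len(fn)) are always in range, so getD's default is never used
def pvPB (cs : List Char) (i : Nat) : Bool :=
  i == 0 || (PySem.Chars.isdigit (cs.getD i ' ') != PySem.Chars.isdigit (cs.getD (i - 1) ' '))

-- the comprehension: [i for i in range(len(fn)) if i == 0 or fn[i].isdigit() != fn[i-1].isdigit()]
def pvCutsB (cs : List Char) : List Nat := (List.range cs.length).filter (pvPB cs)

def split_fn_by_number_alt (fn : String) : List String :=
  let cs := fn.toList
  let cuts := pvCutsB cs ++ [cs.length]
  -- fn[a:b] with 0 ≤ a ≤ b ≤ len(fn) is exactly (cs.drop a).take (b - a) here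
  (cuts.zip cuts.tail).map (fun p => String.mk ((cs.drop p.1).take (p.2 - p.1)))

-- ===== PRECONDITION & SPEC =====
def Spec_split_fn_by_number (fn : String) (out : List String) : Prop := out = split_fn_by_number_alt fn
instance (fn : String) (out : List String) : Decidable (Spec_split_fn_by_number fn out) := by unfold Spec_split_fn_by_number; infer_instance

-- ===== CLAIM (what is proved, stated in full; the proofs are below) =====
def Claim_equal_split_fn_by_number : Prop := ∀ (fn : String), Dom_split_fn_by_number fn → Spec_split_fn_by_number fn (split_fn_by_number fn)

-- ===== LEMMAS AND PROOFS =====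

-- the common characterisation both ports are proved equal to: maximal runs of equal isdigit class
def pvGroups : List Char → List String
  | [] => []
  | c :: cs =>
    let k := PySem.Chars.isdigit c
    String.mk (c :: cs.takeWhile (fun d => PySem.Chars.isdigit d == k))
      :: pvGroups (cs.dropWhile (fun d => PySem.Chars.isdigit d == k))
termination_by cs => cs.length
decreasing_by
  simpa using Nat.lt_succ_of_le (List.length_dropWhile_le _ _)

-- ---------- A = pvGroups ----------

-- what A's loop produces from a nonempty builder whose last char's class is rd
def pvGlue (b : List Char) (rd : Bool) (cs : List Char) : List String :=
  String.mk (b ++ cs.takeWhile (fun d => PySem.Chars.isdigit d == rd))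
    :: pvGroups (cs.dropWhile (fun d => PySem.Chars.isdigit d == rd))

theorem pvLoop_invariant (cs : List Char) :
    ∀ (b : List Char) (ret : List String) (rd : Bool), b ≠ [] →
      (pvBuildA (cs.foldl pvStepA (b, ret, rd)).1 (cs.foldl pvStepA (b, ret, rd)).2.1).2
        = ret ++ pvGlue b rd cs := by
  induction cs with
  | nil =>
    intro b ret rd hb
    simp [pvBuildA, pvGlue, pvGroups, hb]
  | cons c cs ih =>
    intro b ret rd hb
    by_cases hd : PySem.Chars.isdigit c = rd
    · have hstep : pvStepA (b, ret, rd) c = (b ++ [c], ret, rd) := by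
        simp [pvStepA, hd]
      rw [List.foldl_cons, hstep, ih (b ++ [c]) ret rd (by simp)]
      simp [pvGlue, hd]
    · have hstep : pvStepA (b, ret, rd) c = ([c], ret ++ [String.mk b], PySem.Chars.isdigit c) := by
        simp [pvStepA, pvBuildA, hb, hd, bne_iff_ne]
      rw [List.foldl_cons, hstep, ih [c] (ret ++ [String.mk b]) (PySem.Chars.isdigit c) (by simp)]
      simp [pvGlue, pvGroups, hd]

theorem pvA_eq_groups (fn : String) : split_fn_by_number fn = pvGroups fn.toList := by
  unfold split_fn_by_number
  cases h : fn.toList with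
  | nil => simp [pvBuildA, pvGroups]
  | cons c cs =>
    have hstep : pvStepA ([], [], false) c = ([c], [], PySem.Chars.isdigit c) := by
      cases hv : PySem.Chars.isdigit c <;> simp [pvStepA, pvBuildA, hv]
    rw [List.foldl_cons, hstep,
      pvLoop_invariant cs [c] [] (PySem.Chars.isdigit c) (by simp)]
    simp [pvGlue, pvGroups]

-- ---------- B = pvGroups ----------

-- B's body on a char list
def pvAltL (cs : List Char) : List String :=
  let cuts := pvCutsB cs ++ [cs.length]
  (cuts.zip cuts.tail).map (fun p => String.mk ((cs.drop p.1).take (p.2 - p.1)))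

-- every element of the leading run c :: takeWhile … has class isdigit c
theorem pvRun_class (c : Char) (cs : List Char) :
    ∀ x ∈ c :: cs.takeWhile (fun d => PySem.Chars.isdigit d == PySem.Chars.isdigit c),
      PySem.Chars.isdigit x = PySem.Chars.isdigit c := by
  intro x hx
  rcases List.mem_cons.mp hx with h | h
  · rw [h]
  · simpa using List.mem_takeWhile_imp h

-- boundary indices of cs = c :: cs' decompose as 0 :: shifted boundaries of the dropWhile suffix
theorem pvCuts_cons (c : Char) (cs' : List Char) :
    pvCutsB (c :: cs') =
      0 :: ((pvCutsB (cs'.dropWhile (fun d => PySem.Chars.isdigit d == PySem.Chars.isdigit c))).map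
        (· + ((cs'.takeWhile (fun d => PySem.Chars.isdigit d == PySem.Chars.isdigit c)).length + 1))) := by
  set k := PySem.Chars.isdigit c with hk
  set t := cs'.takeWhile (fun d => PySem.Chars.isdigit d == k) with ht
  set d := cs'.dropWhile (fun d => PySem.Chars.isdigit d == k) with hd
  have hsplit : c :: cs' = (c :: t) ++ d := by
    simp [ht, hd, List.takeWhile_append_dropWhile]
  set r := t.length + 1 with hr
  have hlen : (c :: cs').length = r + d.length := by
    rw [hsplit]; simp [hr]; omega
  have hgetL : ∀ i, i < r → (c :: cs').getD i ' ' = (c :: t).getD i ' ' := by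
    intro i hi
    rw [hsplit]
    exact List.getD_append _ _ _ _ (by simpa [hr] using hi)
  have hgetR : ∀ i, (c :: cs').getD (r + i) ' ' = d.getD i ' ' := by
    intro i
    rw [hsplit]
    have hl : (c :: t).length = r := by simp [hr]
    have := List.getD_append_right (c :: t) d ' ' (r + i) (by omega)
    rwa [hl, (by omega : r + i - r = i)] at this
  have hclassL : ∀ i, i < r → PySem.Chars.isdigit ((c :: cs').getD i ' ') = k := by
    intro i hi
    rw [hgetL i hi]
    have hm : (c :: t).getD i ' ' ∈ c :: t := by
      rw [List.getD_eq_getElem _ _ (by simpa [hr] using hi)]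
      exact List.getElem_mem _
    simpa [hk, ht] using pvRun_class c cs' _ hm
  unfold pvCutsB
  rw [hlen, List.range_add, List.filter_append]
  have hleft : (List.range r).filter (pvPB (c :: cs')) = [0] := by
    have h1 : (List.range r).filter (pvPB (c :: cs')) = (List.range r).filter (fun i => i == 0) := by
      apply List.filter_congr
      intro i hi
      have hi' : i < r := List.mem_range.mp hi
      rcases Nat.eq_zero_or_pos i with h0 | h0
      · simp [h0, pvPB]
      · have e1 := hclassL i hi'
        have e2 := hclassL (i - 1) (by omega)
        simp only [pvPB]
        rw [e1, e2]
        simp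
    rw [h1]
    have : r = (r - 1) + 1 := by omega
    rw [this, List.range_succ_eq_map]
    simp
  have hright : ((List.range d.length).map (fun x => r + x)).filter (pvPB (c :: cs'))
      = ((List.range d.length).filter (pvPB d)).map (fun x => r + x) := by
    rw [List.filter_map]
    congr 1
    apply List.filter_congr
    intro i hi
    have him : i < d.length := List.mem_range.mp hi
    have hdne : d ≠ [] := by intro h; rw [h] at him; simp at him
    show pvPB (c :: cs') (r + i) = pvPB d i
    rcases Nat.eq_zero_or_pos i with h0 | h0
    · subst h0
      have hh : PySem.Chars.isdigit (d.getD 0 ' ') ≠ k := by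
        have hiff : d.getD 0 ' ' = d.head hdne := by
          rw [List.getD_eq_getElem _ _ (by omega)]
          simp [List.head_eq_getElem]
        rw [hiff]
        have hp := List.head_dropWhile_not (fun x => PySem.Chars.isdigit x == k) (l := cs') (hd ▸ hdne)
        simp only [← hd] at hp
        simpa using hp
      have hhead : PySem.Chars.isdigit ((c :: cs').getD (r + 0) ' ') ≠ k := by
        rw [hgetR 0]; exact hh
      have hlast : PySem.Chars.isdigit ((c :: cs').getD (r + 0 - 1) ' ') = k :=
        hclassL (r + 0 - 1) (by omega)
      have hb : (PySem.Chars.isdigit ((c :: cs').getD (r + 0) ' ')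
          != PySem.Chars.isdigit ((c :: cs').getD (r + 0 - 1) ' ')) = true := by
        rw [bne_iff_ne, hlast]; exact hhead
      simp only [pvPB, hb]
      simp
    · have e1 : (c :: cs').getD (r + i) ' ' = d.getD i ' ' := hgetR i
      have e2 : (c :: cs').getD (r + i - 1) ' ' = d.getD (i - 1) ' ' := by
        rw [(by omega : r + i - 1 = r + (i - 1))]; exact hgetR (i - 1)
      simp only [pvPB]
      rw [e1, e2]
      have h1 : (r + i == 0) = false := by simp
      have h2 : (i == 0) = false := by simp; omega
      rw [h1, h2]
  rw [hleft, hright]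
  simp only [List.cons_append, List.nil_append]
  congr 1
  apply List.map_congr_left
  intro i _
  omega

-- boundary lists of nonempty inputs start with 0
theorem pvCuts_head (cs : List Char) (h : cs ≠ []) :
    ∃ rest, pvCutsB cs = 0 :: rest := by
  cases cs with
  | nil => exact absurd rfl h
  | cons c cs' => exact ⟨_, pvCuts_cons c cs'⟩

-- B computes the maximal-run decomposition
theorem pvAltL_eq_groups : ∀ (n : Nat) (cs : List Char), cs.length ≤ n → pvAltL cs = pvGroups cs := by
  intro n
  induction n with
  | zero =>
    intro cs hcs
    have : cs = [] := List.length_eq_zero_iff.mp (Nat.le_zero.mp hcs)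
    subst this
    simp [pvAltL, pvCutsB, pvGroups]
  | succ n ih =>
    intro cs hcs
    cases cs with
    | nil => simp [pvAltL, pvCutsB, pvGroups]
    | cons c cs' =>
      set k := PySem.Chars.isdigit c with hk
      set t := cs'.takeWhile (fun d => PySem.Chars.isdigit d == k) with ht
      set d := cs'.dropWhile (fun d => PySem.Chars.isdigit d == k) with hd
      set r := t.length + 1 with hr
      have hsplit : c :: cs' = (c :: t) ++ d := by
        simp [ht, hd, List.takeWhile_append_dropWhile]
      have hlen : (c :: cs').length = r + d.length := by
        rw [hsplit]; simp [hr]; omega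
      have hdn : d.length ≤ n := by
        have h1 : d.length ≤ cs'.length := hd ▸ List.length_dropWhile_le _ _
        have h2 : cs'.length ≤ n := by simpa using hcs
        omega
      have hcuts : pvCutsB (c :: cs') = 0 :: (pvCutsB d).map (fun x => x + r) := by
        simpa [hk, ht, hd, hr] using pvCuts_cons c cs'
      -- the full boundary list with the final endpoint
      have hM : pvCutsB (c :: cs') ++ [(c :: cs').length]
          = 0 :: ((pvCutsB d ++ [d.length]).map (fun x => x + r)) := by
        rw [hcuts, hlen]
        simp [Nat.add_comm]
      -- M := cuts d ++ [d.length] always starts with 0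
      obtain ⟨rest, hMhead⟩ : ∃ rest, pvCutsB d ++ [d.length] = 0 :: rest := by
        by_cases hdk : d = []
        · exact ⟨[], by rw [hdk]; simp [pvCutsB]⟩
        · obtain ⟨r0, hr0⟩ := pvCuts_head d hdk
          exact ⟨r0 ++ [d.length], by rw [hr0]; simp⟩
      -- slice shifting: a slice of cs at (a+r, b+r) is a slice of d at (a, b)
      have hdrop : ∀ a : Nat, (c :: cs').drop (a + r) = d.drop a := by
        intro a
        rw [hsplit, List.drop_append]
        have hl : (c :: t).length = r := by simp [hr]
        rw [List.drop_eq_nil_of_le (by omega), hl, (by omega : a + r - r = a)]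
        simp
      have htake : (c :: cs').take r = c :: t := by
        rw [hsplit, List.take_append]
        have hl : (c :: t).length = r := by simp [hr]
        rw [List.take_of_length_le (by omega), hl, (by omega : r - r = 0)]
        simp
      -- unfold B on c :: cs'
      show pvAltL (c :: cs') = pvGroups (c :: cs')
      unfold pvAltL
      rw [hM, hMhead]
      have hgroups : pvGroups (c :: cs') = String.mk (c :: t) :: pvGroups d := by
        rw [pvGroups]
      rw [hgroups]
      simp only [List.map_cons, List.zip_cons_cons, List.tail_cons, List.map_cons]
      congr 1
      · -- first segment: fn[0 : r] = c :: t
        rw [(by omega : 0 + r - 0 = r), List.drop_zero, htake]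
      · -- remaining segments are B applied to d, shifted by r
        have htail : (((0 + r) :: List.map (fun x => x + r) rest).zip (List.map (fun x => x + r) rest))
            = List.map (Prod.map (fun x => x + r) (fun x => x + r)) ((0 :: rest).zip rest) := by
          rw [show ((0 + r) :: List.map (fun x => x + r) rest)
              = List.map (fun x => x + r) (0 :: rest) by simp]
          exact List.zip_map
        rw [htail, ← ih d hdn]
        unfold pvAltL
        rw [hMhead]
        simp only [List.tail_cons]
        rw [List.map_map]
        apply List.map_congr_left
        intro p _
        simp only [Function.comp, Prod.map]
        rw [hdrop p.1, (by omega : p.2 + r - (p.1 + r) = p.2 - p.1)]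


-- ===== VERDICT (by name: the statement is the Claim_ definition above) =====
theorem split_fn_by_number_spec : Claim_equal_split_fn_by_number := by
  intro fn _
  unfold Spec_split_fn_by_number
  rw [pvA_eq_groups, show split_fn_by_number_alt fn = pvAltL fn.toList from rfl,
    pvAltL_eq_groups fn.toList.length fn.toList le_rfl]
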